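-- pv_equiv track=rewrite | github.com/HaugPixel/CompProg | ProgrammingChallenges/Chapter_1/LsdDisplay/LsdDisplay.py | printNine
-- ===== SOURCE A (Python) =====
-- def printNine(n):
--     printArea = []
--     printArea.append(' ' + '-' * n + ' ')
--     [printArea.append('|' + ' ' * n + '|')for _ in range(n)]
--     printArea.append(' ' + '-' * n + ' ')
--     [printArea.append(' ' * (n + 1) + '|') for _ in range(n)]
--     printArea.append(' ' + '-' * n + ' ')
--     return printArea
-- ===== SOURCE B (Python) =====
-- def printNine(n):
--     m = max(n, 0)  # Python's ''*n already treats negative n as 0 rows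
--     rows = []
--     for i in range(2 * m + 3):
--         if i == 0 or i == m + 1 or i == 2 * m + 2:
--             rows.append(' ' + '-' * m + ' ')
--         elif i <= m:
--             rows.append('|' + ' ' * m + '|')
--         else:
--             rows.append(' ' * (m + 1) + '|')
--     return rows
-- ===== Notes on version B (the rewrite author's own statement) =====
-- stated objective: alternative
-- what changed: Replaces A's five separate append/comprehension blocks with one positional loop over range(2*m+3) that classifies each row (border, upper middle, lower middle) by its index.
import Mathlib
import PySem

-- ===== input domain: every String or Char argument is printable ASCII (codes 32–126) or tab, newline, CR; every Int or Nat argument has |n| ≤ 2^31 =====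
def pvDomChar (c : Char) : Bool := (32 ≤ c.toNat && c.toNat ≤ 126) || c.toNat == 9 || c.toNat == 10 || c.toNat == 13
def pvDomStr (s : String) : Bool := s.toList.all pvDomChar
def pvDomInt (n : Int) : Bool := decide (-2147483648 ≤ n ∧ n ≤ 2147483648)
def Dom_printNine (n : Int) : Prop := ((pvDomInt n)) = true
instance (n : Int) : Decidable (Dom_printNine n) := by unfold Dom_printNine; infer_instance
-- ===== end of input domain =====

-- B replaces A's five separate append/comprehension blocks with one index-classifying
-- loop over all 2*m+3 rows (objective: alternative decomposition, same cost).

-- Python's  c * k  on a string: negative count gives '' (exact: toNat clamps like Python's repeat)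
def pyRep (c : Char) (k : Int) : List Char := List.replicate k.toNat c

-- ===== PORT A =====
def printNine (n : Int) : List String :=
  let printArea : List String := []
  let printArea := printArea ++ [String.ofList ([' '] ++ pyRep '-' n ++ [' '])]
  let printArea := (PySem.List.pyRange 0 n 1).foldl
    (fun acc _ => acc ++ [String.ofList (['|'] ++ pyRep ' ' n ++ ['|'])]) printArea
  let printArea := printArea ++ [String.ofList ([' '] ++ pyRep '-' n ++ [' '])]
  let printArea := (PySem.List.pyRange 0 n 1).foldl
    (fun acc _ => acc ++ [String.ofList (pyRep ' ' (n + 1) ++ ['|'])]) printArea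
  printArea ++ [String.ofList ([' '] ++ pyRep '-' n ++ [' '])]

-- ===== PORT B =====
def printNine_alt (n : Int) : List String :=
  let m := max n 0
  (PySem.List.pyRange 0 (2 * m + 3) 1).foldl
    (fun rows i =>
      rows ++ [ if i = 0 ∨ i = m + 1 ∨ i = 2 * m + 2 then
                  String.ofList ([' '] ++ pyRep '-' m ++ [' '])
                else if i ≤ m then
                  String.ofList (['|'] ++ pyRep ' ' m ++ ['|'])
                else
                  String.ofList (pyRep ' ' (m + 1) ++ ['|']) ]) []

-- ===== PRECONDITION & SPEC =====
def Spec_printNine (n : Int) (out : List String) : Prop := out = printNine_alt n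
instance (n : Int) (out : List String) : Decidable (Spec_printNine n out) := by unfold Spec_printNine; infer_instance

-- ===== CLAIM (what is proved, stated in full; the proofs are below) =====
def Claim_equal_printNine : Prop := ∀ (n : Int), Dom_printNine n → Spec_printNine n (printNine n)

-- ===== LEMMAS AND PROOFS =====

-- a map of a function constant on a range of one step
theorem map_pyRange_const {α : Type} (f : Int → α) (a b : Int) (c : α)
    (h : ∀ i, a ≤ i → i < b → f i = c) :
    (PySem.List.pyRange a b 1).map f = List.replicate (b - a).toNat c := by
  have := PySem.List.length_pyRange_one a b
  rw [List.eq_replicate_iff]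
  refine ⟨by simp [this], ?_⟩
  intro x hx
  obtain ⟨i, hi, rfl⟩ := List.mem_map.mp hx
  rw [PySem.List.mem_pyRange_one] at hi
  exact h i hi.1 hi.2

theorem printNine_spec_aux (n : Int) : printNine n = printNine_alt n := by
  set m := max n 0 with hm
  have hm0 : 0 ≤ m := le_max_right n 0
  have htn : m.toNat = n.toNat := by omega
  -- A side: folds are appended maps of constants
  have hA : printNine n =
      [String.ofList ([' '] ++ pyRep '-' n ++ [' '])]
        ++ List.replicate n.toNat (String.ofList (['|'] ++ pyRep ' ' n ++ ['|']))
        ++ [String.ofList ([' '] ++ pyRep '-' n ++ [' '])]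
        ++ List.replicate n.toNat (String.ofList (pyRep ' ' (n + 1) ++ ['|']))
        ++ [String.ofList ([' '] ++ pyRep '-' n ++ [' '])] := by
    simp only [printNine, PySem.List.foldl_append_singleton_eq_map,
      map_pyRange_const _ 0 n _ (fun _ _ _ => rfl)]
    simp
  -- B side: split the single range into the five row groups and evaluate the classifier
  have hsplit : PySem.List.pyRange 0 (2 * m + 3) 1 =
      PySem.List.pyRange 0 1 1 ++ PySem.List.pyRange 1 (m + 1) 1
        ++ PySem.List.pyRange (m + 1) (m + 2) 1 ++ PySem.List.pyRange (m + 2) (2 * m + 2) 1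
        ++ PySem.List.pyRange (2 * m + 2) (2 * m + 3) 1 := by
    rw [PySem.List.pyRange_one_append 0 (2 * m + 2) (2 * m + 3) (by omega) (by omega),
        PySem.List.pyRange_one_append 0 (m + 2) (2 * m + 2) (by omega) (by omega),
        PySem.List.pyRange_one_append 0 (m + 1) (m + 2) (by omega) (by omega),
        PySem.List.pyRange_one_append 0 1 (m + 1) (by omega) (by omega)]
  have hB : printNine_alt n =
      [String.ofList ([' '] ++ pyRep '-' m ++ [' '])]
        ++ List.replicate m.toNat (String.ofList (['|'] ++ pyRep ' ' m ++ ['|']))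
        ++ [String.ofList ([' '] ++ pyRep '-' m ++ [' '])]
        ++ List.replicate m.toNat (String.ofList (pyRep ' ' (m + 1) ++ ['|']))
        ++ [String.ofList ([' '] ++ pyRep '-' m ++ [' '])] := by
    rw [printNine_alt]
    simp only [← hm, PySem.List.foldl_append_singleton_eq_map, List.nil_append, hsplit,
      List.map_append]
    rw [map_pyRange_const _ 0 1 (String.ofList ([' '] ++ pyRep '-' m ++ [' ']))
          (by intro i h1 h2; rw [if_pos (by omega)]),
        map_pyRange_const _ 1 (m + 1) (String.ofList (['|'] ++ pyRep ' ' m ++ ['|']))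
          (by intro i h1 h2; rw [if_neg (by omega), if_pos (by omega)]),
        map_pyRange_const _ (m + 1) (m + 2) (String.ofList ([' '] ++ pyRep '-' m ++ [' ']))
          (by intro i h1 h2; rw [if_pos (by omega)]),
        map_pyRange_const _ (m + 2) (2 * m + 2) (String.ofList (pyRep ' ' (m + 1) ++ ['|']))
          (by intro i h1 h2; rw [if_neg (by omega), if_neg (by omega)]),
        map_pyRange_const _ (2 * m + 2) (2 * m + 3) (String.ofList ([' '] ++ pyRep '-' m ++ [' ']))
          (by intro i h1 h2; rw [if_pos (by omega)])]
    have c : (2 * m - m).toNat = m.toNat := by omega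
    simp [c]
  rw [hA, hB]
  by_cases h : 0 ≤ n
  · have hmn : m = n := by rw [hm, max_eq_left h]
    rw [hmn]
  · have hm' : m = 0 := by rw [hm, max_eq_right (by omega)]
    have hn0 : n.toNat = 0 := by omega
    simp [hm', hn0, pyRep]

-- ===== VERDICT (by name: the statement is the Claim_ definition above) =====
theorem printNine_spec : Claim_equal_printNine := by
  intro n _
  exact printNine_spec_aux n
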